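-- pv_equiv track=rewrite | github.com/vanimesh76/eqpy | eqpy/features/zigzag.py | zigzag_upper_triangle
-- ===== SOURCE A (Python) =====
-- def zigzag_upper_triangle(n_values):
--     """Reads the matrix in a jpeg zigzag order ONLY FOR THE UPPER LEFT TRIANGLE
--
--     Warning
--     -------
--     Will work ONLY for the upper left triangle!!
--
--     Parameters
--     ----------
--     matrix: array of shape (heights, width)
--     n_values: number of values to read
--
--     Returns
--     -------
--     values: list of len n_values containing the first values
--         read in jpeg zigzag order
--
--     Notes
--     -----
--     zigzag order:
--     [[ 0  1  5  6 14]
--      [ 2  4  7 13 15]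
--      [ 3  8 12 16 21]
--      [ 9 11 17 20 22]
--      [10 18 19 23 24]]
--     """
--     x_indices = [0]
--     x_max = 1
--     while len(x_indices) < n_values:
--         indices = list(range(x_max + 1))
--         x_indices += indices + [x_max + 1] + indices[::-1]
--         x_max += 2
--
--     y_indices = []
--     y_max = 0
--     while len(y_indices) < n_values:
--         indices = list(range(y_max + 1))
--         y_indices += indices + [y_max + 1] + indices[::-1]
--         y_max += 2
--
--     return x_indices[:n_values], y_indices[:n_values]
-- ===== SOURCE B (Python) =====
-- def zigzag_upper_triangle(n_values):
--     """Diagonal-by-diagonal zigzag generator: one combined pass builds both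
--     index lists, walking each anti-diagonal d (even d downward, odd d upward)."""
--     rows = []
--     cols = []
--     d = 0
--     while len(rows) < n_values:
--         rng = range(d, -1, -1) if d % 2 == 0 else range(0, d + 1)
--         for r in rng:
--             rows.append(r)
--             cols.append(d - r)
--         d += 1
--     return rows[:n_values], cols[:n_values]
-- ===== Notes on version B (the rewrite author's own statement) =====
-- stated objective: idiomatic
-- what changed: B replaces A's two independent while-loops (each emitting two diagonals by building a range, a peak element and its reversal, separately for x and y) with the standard single diagonal-by-diagonal zigzag generator that walks each anti-diagonal once (even d downward, odd d upward) and appends to both index lists in one combined pass.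
import Mathlib
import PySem

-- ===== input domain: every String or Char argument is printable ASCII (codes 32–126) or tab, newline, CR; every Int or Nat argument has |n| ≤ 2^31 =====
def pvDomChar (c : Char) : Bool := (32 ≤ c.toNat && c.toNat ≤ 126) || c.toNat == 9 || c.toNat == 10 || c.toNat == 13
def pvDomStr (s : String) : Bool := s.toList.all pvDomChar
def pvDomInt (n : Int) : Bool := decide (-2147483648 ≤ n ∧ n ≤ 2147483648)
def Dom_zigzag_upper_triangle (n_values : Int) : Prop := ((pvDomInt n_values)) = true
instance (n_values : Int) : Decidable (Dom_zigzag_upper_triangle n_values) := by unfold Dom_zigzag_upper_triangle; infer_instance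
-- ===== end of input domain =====

-- B replaces A's two independent reversal-based while-loops with the standard single
-- diagonal-by-diagonal zigzag generator building both index lists in one pass (idiomatic; same cost).

-- ===== PORT A =====
-- A's two while-loops have the same body ('indices = list(range(m+1)); acc += indices + [m+1] + indices[::-1]; m += 2'),
-- so one helper, called twice with each loop's initial state, transcribes them. The while-loop is fuel recursion
-- (fuel = n_values.toNat, enough since every iteration appends at least one element); fuel-out is unreachable.
def pvLoopA (n_values : Int) (fuel : Nat) (acc : List Int) (m : Int) : List Int :=
  match fuel with
  | 0 => acc
  | fuel + 1 =>
    if (acc.length : Int) < n_values then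
      let indices := PySem.List.pyRange 0 (m + 1) 1
      -- indices[::-1] is slice?; step -1 never fails, so getD [] is exact
      pvLoopA n_values fuel (acc ++ indices ++ [m + 1] ++ ((PySem.List.slice? indices none none (-1)).getD [])) (m + 2)
    else acc

def zigzag_upper_triangle (n_values : Int) : List Int × List Int :=
  let x_indices := pvLoopA n_values n_values.toNat [0] 1
  let y_indices := pvLoopA n_values n_values.toNat [] 0
  (PySem.List.slice x_indices none (some n_values), PySem.List.slice y_indices none (some n_values))

-- ===== PORT B =====
-- Source B's while-loop as fuel recursion; the inner for-loop over rng is a foldl appending to both lists.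
def pvLoopB (n_values : Int) (fuel : Nat) (rows cols : List Int) (d : Int) : List Int × List Int :=
  match fuel with
  | 0 => (rows, cols)
  | fuel + 1 =>
    if (rows.length : Int) < n_values then
      let rng := if PySem.Int.mod d 2 = 0 then PySem.List.pyRange d (-1) (-1) else PySem.List.pyRange 0 (d + 1) 1
      let p := rng.foldl (fun s r => (s.1 ++ [r], s.2 ++ [d - r])) (rows, cols)
      pvLoopB n_values fuel p.1 p.2 (d + 1)
    else (rows, cols)

def zigzag_upper_triangle_alt (n_values : Int) : List Int × List Int :=
  let p := pvLoopB n_values n_values.toNat [] [] 0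
  (PySem.List.slice p.1 none (some n_values), PySem.List.slice p.2 none (some n_values))

-- ===== PRECONDITION & SPEC =====
def Spec_zigzag_upper_triangle (n_values : Int) (out : List Int × List Int) : Prop := out = zigzag_upper_triangle_alt n_values
instance (n_values : Int) (out : List Int × List Int) : Decidable (Spec_zigzag_upper_triangle n_values out) := by unfold Spec_zigzag_upper_triangle; infer_instance

-- ===== CLAIM (what is proved, stated in full; the proofs are below) =====
def Claim_equal_zigzag_upper_triangle : Prop := ∀ (n_values : Int), Dom_zigzag_upper_triangle n_values → Spec_zigzag_upper_triangle n_values (zigzag_upper_triangle n_values)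

-- ===== LEMMAS AND PROOFS =====

-- ascending diagonal [0, 1, …, k] as Ints
def pvAsc (k : Nat) : List Int := (List.range (k + 1)).map (fun i : Nat => (i : Int))
-- row indices of anti-diagonal d (even d walks downward), and the column indices
def pvDiagR (d : Nat) : List Int := if d % 2 = 0 then (pvAsc d).reverse else pvAsc d
def pvDiagC (d : Nat) : List Int := if d % 2 = 0 then pvAsc d else (pvAsc d).reverse
-- concatenation of the first m anti-diagonals of g
def pvP (g : Nat → List Int) (m : Nat) : List Int := (List.range m).flatMap g

theorem pvAsc_succ (k : Nat) : pvAsc (k + 1) = pvAsc k ++ [(k : Int) + 1] := by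
  simp [pvAsc, List.range_succ]

theorem pvAsc_length (k : Nat) : (pvAsc k).length = k + 1 := by simp [pvAsc]

theorem pvAsc_map_sub (k : Nat) :
    (pvAsc k).map (fun r => (k : Int) - r) = (pvAsc k).reverse := by
  unfold pvAsc
  apply List.ext_getElem
  · simp
  · intro i h1 h2
    simp only [List.length_map, List.length_range] at h1
    simp only [List.getElem_map, List.getElem_reverse, List.getElem_range,
      List.length_map, List.length_range]
    omega

theorem pvRange_asc (k : Nat) : PySem.List.pyRange 0 ((k : Int) + 1) 1 = pvAsc k := by
  have h1 : ((k : Int) + 1) = ((k + 1 : Nat) : Int) := by push_cast; ring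
  rw [h1, PySem.List.pyRange_one]
  have h2 : (((k + 1 : Nat) : Int) - 0).toNat = k + 1 := by omega
  rw [h2]
  unfold pvAsc
  refine List.map_congr_left ?_
  intro x _
  simp

theorem pvRange_desc (k : Nat) : PySem.List.pyRange (k : Int) (-1) (-1) = (pvAsc k).reverse := by
  rw [PySem.List.pyRange_neg_one, ← pvAsc_map_sub]
  have h1 : ((k : Int) - (-1)).toNat = k + 1 := by omega
  rw [h1]
  unfold pvAsc
  rw [List.map_map]
  rfl

theorem pvDiagR_length (d : Nat) : (pvDiagR d).length = d + 1 := by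
  unfold pvDiagR; split <;> simp [pvAsc_length]

theorem pvDiagC_length (d : Nat) : (pvDiagC d).length = d + 1 := by
  unfold pvDiagC; split <;> simp [pvAsc_length]

theorem pvP_succ (g : Nat → List Int) (m : Nat) : pvP g (m + 1) = pvP g m ++ g m := by
  simp [pvP, List.range_succ]

theorem pvP_prefix (g : Nat → List Int) {m m' : Nat} (h : m ≤ m') : pvP g m <+: pvP g m' := by
  induction m', h using Nat.le_induction with
  | base => exact List.prefix_refl _
  | succ m' _ ih =>
    refine ih.trans ?_
    rw [pvP_succ]
    exact List.prefix_append _ _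

theorem pvP_length_eq (m : Nat) : (pvP pvDiagR m).length = (pvP pvDiagC m).length := by
  induction m with
  | zero => rfl
  | succ m ih => simp [pvP_succ, ih, pvDiagR_length, pvDiagC_length]

theorem pvTake_eq_of_prefix {l l' : List Int} (N : Nat) (h : l <+: l') (hN : N ≤ l.length) :
    l'.take N = l.take N := by
  obtain ⟨t, rfl⟩ := h
  exact List.take_append_of_le_length hN

theorem pvTake_pvP_eq (g : Nat → List Int) (N : Nat) {m m' : Nat}
    (h : N ≤ (pvP g m).length) (h' : N ≤ (pvP g m').length) :
    (pvP g m).take N = (pvP g m').take N := by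
  rcases Nat.le_total m m' with hle | hle
  · exact (pvTake_eq_of_prefix N (pvP_prefix g hle) h).symm
  · exact pvTake_eq_of_prefix N (pvP_prefix g hle) h'

-- the common appended block of A's loop body equals the next two diagonals
theorem pvBlockR (k : Nat) (hk : k % 2 = 1) :
    pvDiagR k ++ pvDiagR (k + 1) = pvAsc k ++ [(k : Int) + 1] ++ (pvAsc k).reverse := by
  unfold pvDiagR
  have h1 : ¬ k % 2 = 0 := by omega
  have h2 : (k + 1) % 2 = 0 := by omega
  simp [h1, h2, pvAsc_succ, List.append_assoc]

theorem pvBlockC (k : Nat) (hk : k % 2 = 0) :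
    pvDiagC k ++ pvDiagC (k + 1) = pvAsc k ++ [(k : Int) + 1] ++ (pvAsc k).reverse := by
  unfold pvDiagC
  have h2 : ¬ (k + 1) % 2 = 0 := by omega
  simp [hk, h2, pvAsc_succ, List.append_assoc]

-- A's loop, started on a diagonal prefix, ends on a longer diagonal prefix covering n values
theorem pvLoopA_spec (n : Int) (g : Nat → List Int)
    (hlen : ∀ d, (g d).length = d + 1) (par : Nat)
    (hblk : ∀ k, k % 2 = par → g k ++ g (k + 1) = pvAsc k ++ [(k : Int) + 1] ++ (pvAsc k).reverse) :
    ∀ (f k : Nat), k % 2 = par → n.toNat ≤ f + (pvP g k).length →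
    ∃ m, pvLoopA n f (pvP g k) (k : Int) = pvP g m ∧ n.toNat ≤ (pvP g m).length := by
  intro f
  induction f with
  | zero =>
    intro k _ h
    exact ⟨k, rfl, by omega⟩
  | succ f ih =>
    intro k hk h
    rw [pvLoopA]
    split
    · next hcond =>
      have hlt : (pvP g k).length < n.toNat := by omega
      have hrw : pvP g k ++ PySem.List.pyRange 0 ((k : Int) + 1) 1 ++ [(k : Int) + 1] ++
          ((PySem.List.slice? (PySem.List.pyRange 0 ((k : Int) + 1) 1) none none (-1)).getD [])
          = pvP g (k + 2) := by
        rw [PySem.List.slice?_none_none_neg_one, pvRange_asc]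
        have : pvP g (k + 2) = pvP g k ++ (g k ++ g (k + 1)) := by
          rw [pvP_succ, pvP_succ, List.append_assoc]
        rw [this, hblk k hk, Option.getD_some, List.append_assoc, List.append_assoc,
            List.append_assoc]
      have hcast : ((k : Int) + 2) = (((k + 2 : Nat)) : Int) := by push_cast; ring
      simp only [hrw, hcast]
      have hlen2 : (pvP g (k + 2)).length = (pvP g k).length + (2 * k + 3) := by
        rw [pvP_succ, pvP_succ]
        simp [hlen k, hlen (k + 1)]
        omega
      exact ih (k + 2) (by omega) (by omega)
    · next hcond =>
      exact ⟨k, rfl, by omega⟩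

-- B's loop, started on the pair of diagonal prefixes, ends on a longer pair covering n values
theorem pvLoopB_spec (n : Int) :
    ∀ (f d : Nat), n.toNat ≤ f + (pvP pvDiagR d).length →
    ∃ m, pvLoopB n f (pvP pvDiagR d) (pvP pvDiagC d) (d : Int) = (pvP pvDiagR m, pvP pvDiagC m) ∧
      n.toNat ≤ (pvP pvDiagR m).length := by
  intro f
  induction f with
  | zero =>
    intro d h
    exact ⟨d, rfl, by omega⟩
  | succ f ih =>
    intro d h
    rw [pvLoopB]
    split
    · next hcond =>
      have hlt : (pvP pvDiagR d).length < n.toNat := by omega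
      have hmod : PySem.Int.mod (d : Int) 2 = ((d % 2 : Nat) : Int) := by
        exact_mod_cast PySem.Int.mod_natCast d 2
      have hrng : (if PySem.Int.mod (d : Int) 2 = 0 then PySem.List.pyRange (d : Int) (-1) (-1)
          else PySem.List.pyRange 0 ((d : Int) + 1) 1) = pvDiagR d := by
        rw [hmod, pvRange_desc, pvRange_asc]
        unfold pvDiagR
        rcases Nat.even_or_odd d with hd | hd
        · have : d % 2 = 0 := Nat.even_iff.mp hd
          simp [this]
        · have h1 : d % 2 = 1 := Nat.odd_iff.mp hd
          simp [h1]
      have hfold : (pvDiagR d).foldl (fun (s : List Int × List Int) r => (s.1 ++ [r], s.2 ++ [(d : Int) - r]))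
          (pvP pvDiagR d, pvP pvDiagC d)
          = (pvP pvDiagR (d + 1), pvP pvDiagC (d + 1)) := by
        rw [PySem.List.foldl_prod_mk (f := fun s r => s ++ [r]) (g := fun s r => s ++ [(d : Int) - r]),
            PySem.List.foldl_append_singleton_eq_self, PySem.List.foldl_append_singleton_eq_map]
        rw [pvP_succ, pvP_succ]
        congr 1
        have hmapc : (pvDiagR d).map (fun r => (d : Int) - r) = pvDiagC d := by
          unfold pvDiagR pvDiagC
          split
          · rw [List.map_reverse, pvAsc_map_sub, List.reverse_reverse]
          · rw [pvAsc_map_sub]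
        rw [hmapc]
      simp only [hrng, hfold]
      have hlen2 : (pvP pvDiagR (d + 1)).length = (pvP pvDiagR d).length + (d + 1) := by
        simp [pvP_succ, pvDiagR_length]
      have hcast : ((d : Int) + 1) = (((d + 1 : Nat)) : Int) := by push_cast; ring
      simp only [hcast]
      exact ih (d + 1) (by omega)
    · next hcond =>
      exact ⟨d, rfl, by omega⟩

-- slicing with a negative stop on the short initial lists gives []
theorem pvSlice_neg {xs : List Int} (n : Int) (hn : n < 0) (hx : xs.length ≤ 1) :
    PySem.List.slice xs none (some n) = [] := by
  have hk : n = -(((-n).toNat : Nat) : Int) := by omega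
  have hkpos : 0 < (-n).toNat := by omega
  rw [hk, PySem.List.slice_to_neg_natCast _ _ hkpos]
  have : xs.length - (-n).toNat = 0 := by omega
  simp [this]

-- ===== VERDICT (by name: the statement is the Claim_ definition above) =====
theorem zigzag_upper_triangle_spec : Claim_equal_zigzag_upper_triangle := by
  intro n _
  unfold Spec_zigzag_upper_triangle zigzag_upper_triangle zigzag_upper_triangle_alt
  rcases lt_or_ge n 0 with hneg | hpos
  · -- negative n: fuel is 0, every loop returns its initial list, slices are empty
    have h0 : n.toNat = 0 := by omega
    rw [h0]
    simp only [pvLoopA, pvLoopB]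
    have e1 : PySem.List.slice [(0 : Int)] none (some n) = [] := pvSlice_neg n hneg (by simp)
    have e2 : PySem.List.slice ([] : List Int) none (some n) = [] := pvSlice_neg n hneg (by simp)
    rw [e1, e2]
  · -- n ≥ 0 : all three loops end on diagonal prefixes of length ≥ n; the takes agree
    set N := n.toNat with hN
    have hn : n = (N : Int) := by omega
    have hx0 : ([(0 : Int)]) = pvP pvDiagR 1 := by decide
    have hy0 : ([] : List Int) = pvP pvDiagC 0 := rfl
    obtain ⟨m₁, hA1, hL1⟩ := pvLoopA_spec n pvDiagR pvDiagR_length 1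
      (fun k hk => pvBlockR k hk) N 1 rfl (by omega)
    obtain ⟨m₂, hA2, hL2⟩ := pvLoopA_spec n pvDiagC pvDiagC_length 0
      (fun k hk => pvBlockC k hk) N 0 rfl (by omega)
    obtain ⟨m₃, hB, hL3⟩ := pvLoopB_spec n N 0 (by omega)
    have hx0' : pvLoopA n N [0] 1 = pvP pvDiagR m₁ := by rw [hx0]; exact_mod_cast hA1
    have hy0' : pvLoopA n N [] 0 = pvP pvDiagC m₂ := by rw [hy0]; exact_mod_cast hA2
    have hB' : pvLoopB n N [] [] 0 = (pvP pvDiagR m₃, pvP pvDiagC m₃) := by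
      exact_mod_cast hB
    simp only [hx0', hy0', hB']
    rw [hn, PySem.List.slice_to_natCast, PySem.List.slice_to_natCast,
        PySem.List.slice_to_natCast, PySem.List.slice_to_natCast]
    have hc2 : N ≤ (pvP pvDiagC m₂).length := by omega
    have hc3 : N ≤ (pvP pvDiagC m₃).length := by rw [← pvP_length_eq]; omega
    exact Prod.ext (pvTake_pvP_eq pvDiagR N hL1 hL3) (pvTake_pvP_eq pvDiagC N hc2 hc3)
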